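-- pv_equiv track=rewrite | github.com/dgoffredo/hackerrank | determining-dna-health/naive-find.py | min_and_max_scores
-- ===== SOURCE A (Python) =====
-- def num_occurrences(gene, strand):
--     count = 0
--     start = 0
--     while True:
--         start = strand.find(gene, start)
--         if start == -1:
--             return count
--         else:
--             count += 1
--             start += 1
--
-- def min_and_max_scores(scored_genes, strands):
--     min_score = None
--     max_score = None
--
--     for first, last, strand in strands:
--         genes = scored_genes[first:last + 1]
--         score = sum(weight * num_occurrences(gene, strand)
--                     for gene, weight in genes)
--
--         if min_score is None or score < min_score:
--             min_score = score
--         if max_score is None or score > max_score: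
--             max_score = score
--
--     return min_score, max_score
-- ===== SOURCE B (Python) =====
-- def min_and_max_scores(scored_genes, strands):
--     def strand_score(first, last, strand):
--         genes = scored_genes[first:last + 1]
--         # walk the suffixes of the strand (including the empty one), adding at
--         # each suffix the weight of every in-range gene that is a prefix of it
--         total = 0
--         suffix = strand
--         while True:
--             total += sum(w for g, w in genes if suffix.startswith(g))
--             if not suffix:
--                 return total
--             suffix = suffix[1:]
--
--     scores = [strand_score(f, l, s) for f, l, s in strands]
--     if not scores:
--         return (None, None)
--     return (min(scores), max(scores))
-- ===== Notes on version B (the rewrite author's own statement) =====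
-- stated objective: alternative
-- what changed: A folds over strands with a running min/max accumulator and scores each strand by a per-gene repeated str.find counting loop times weight; B first maps each strand to its score by recursing over the strand's suffixes (adding the weights of genes that are prefixes of each suffix), then takes min() and max() of the score list, so it has no find loop, no occurrence counts and no min/max accumulator.
import Mathlib
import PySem

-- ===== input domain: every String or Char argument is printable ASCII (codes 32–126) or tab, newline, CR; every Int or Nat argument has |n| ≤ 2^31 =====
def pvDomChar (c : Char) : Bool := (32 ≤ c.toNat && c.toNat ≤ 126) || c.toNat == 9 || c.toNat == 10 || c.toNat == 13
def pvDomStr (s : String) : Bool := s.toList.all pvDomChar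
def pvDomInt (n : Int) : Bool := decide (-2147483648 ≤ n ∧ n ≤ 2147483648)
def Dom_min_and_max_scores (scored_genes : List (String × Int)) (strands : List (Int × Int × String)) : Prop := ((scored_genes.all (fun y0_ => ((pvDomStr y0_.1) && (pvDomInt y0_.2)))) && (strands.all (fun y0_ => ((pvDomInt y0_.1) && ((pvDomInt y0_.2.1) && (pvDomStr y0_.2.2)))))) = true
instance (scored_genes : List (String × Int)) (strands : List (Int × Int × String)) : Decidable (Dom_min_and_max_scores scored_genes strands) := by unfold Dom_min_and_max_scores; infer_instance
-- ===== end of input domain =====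

-- B maps each strand to its score by recursing over the strand's suffixes (adding the weights
-- of the in-range genes that are prefixes of each suffix) and then takes min/max of the score
-- list, replacing A's per-gene str.find counting loops and running min/max accumulator;
-- objective: alternative algorithm, proved to return the same pair.

-- ===== PORT A =====
-- the `while True` find-loop of num_occurrences, with fuel (strand-length + 2 steps always suffice,
-- since `start` strictly increases and find returns -1 once start exceeds the length)
def pvFindLoopA (strand gene : List Char) : Nat → Int → Nat → Int
  | 0, count, _ => count
  | fuel + 1, count, start =>
    let f := PySem.Chars.findFrom strand gene (start : Int) none
    if f = -1 then count
    else pvFindLoopA strand gene fuel (count + 1) (f.toNat + 1)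

def num_occurrences (gene strand : String) : Int :=
  pvFindLoopA strand.toList gene.toList (strand.toList.length + 2) 0 0

def min_and_max_scores (scored_genes : List (String × Int)) (strands : List (Int × Int × String)) : Option Int × Option Int :=
  strands.foldl (fun acc t =>
    match t, acc with
    | (first, last, strand), (min_score, max_score) =>
      let genes := PySem.List.slice scored_genes (some first) (some (last + 1))
      let score := (genes.map (fun gw => gw.2 * num_occurrences gw.1 strand)).sum
      let min_score := match min_score with
        | none => some score
        | some m => if score < m then some score else some m
      let max_score := match max_score with
        | none => some score
        | some m => if m < score then some score else some m
      (min_score, max_score)) (none, none)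

-- ===== PORT B =====
-- `sum(w for g, w in genes if suffix.startswith(g))`
def pvHitWeights (genes : List (String × Int)) (suffix : List Char) : Int :=
  ((genes.filter (fun gw => gw.1.toList.isPrefixOf suffix)).map (fun gw => gw.2)).sum

-- the `while True` suffix walk of strand_score: add the matching weights, stop after the
-- empty suffix, otherwise drop the first character
def pvSuffWalk (genes : List (String × Int)) : List Char → Int
  | [] => pvHitWeights genes []
  | c :: rest => pvHitWeights genes (c :: rest) + pvSuffWalk genes rest

def min_and_max_scores_alt (scored_genes : List (String × Int)) (strands : List (Int × Int × String)) : Option Int × Option Int :=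
  let scores := strands.map (fun t =>
    pvSuffWalk (PySem.List.slice scored_genes (some t.1) (some (t.2.1 + 1))) t.2.2.toList)
  match scores with
  | [] => (none, none)
  | _ => (PySem.List.min? scores (fun x => x), PySem.List.max? scores (fun x => x))

-- ===== PRECONDITION & SPEC =====
def Spec_min_and_max_scores (scored_genes : List (String × Int)) (strands : List (Int × Int × String)) (out : Option Int × Option Int) : Prop := out = min_and_max_scores_alt scored_genes strands
instance (scored_genes : List (String × Int)) (strands : List (Int × Int × String)) (out : Option Int × Option Int) : Decidable (Spec_min_and_max_scores scored_genes strands out) := by unfold Spec_min_and_max_scores; infer_instance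

-- ===== CLAIM =====
def Claim_equal_min_and_max_scores : Prop := ∀ (scored_genes : List (String × Int)) (strands : List (Int × Int × String)), Dom_min_and_max_scores scored_genes strands → Spec_min_and_max_scores scored_genes strands (min_and_max_scores scored_genes strands)

-- ===== LEMMAS AND PROOFS =====

-- a prefix at position i ≥ start is an infix of the suffix from start
lemma prefix_drop_infix {g s : List Char} {start i : Nat} (hsi : start ≤ i)
    (h : g <+: s.drop i) : g <:+: s.drop start := by
  have hd : s.drop i = (s.drop start).drop (i - start) := by
    rw [List.drop_drop]; congr 1; omega
  rw [hd] at h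
  exact (h.isInfix).trans ((List.drop_suffix (i - start) (s.drop start)).isInfix)

-- A's find loop counts the match positions in [start, length]
lemma pvFindLoopA_eq (s g : List Char) :
    ∀ (fuel start : Nat) (count : Int), start ≤ s.length + 1 → s.length + 2 ≤ fuel + start →
      pvFindLoopA s g fuel count start
        = count + ((List.range' start (s.length + 1 - start)).countP
            (fun i => g.isPrefixOf (s.drop i)) : Int) := by
  intro fuel
  induction fuel with
  | zero => intro start count h1 h2; omega
  | succ fuel ih =>
    intro start count h1 h2
    by_cases hs : start = s.length + 1
    · have hneg : PySem.Chars.findFrom s g (start : Int) none = -1 := by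
        subst hs
        simp only [PySem.Chars.findFrom]
        push_cast
        rw [if_pos (by omega)]
      simp only [pvFindLoopA, hneg]
      subst hs
      simp
    · have hstart : start ≤ s.length := by omega
      have hft := PySem.Chars.findFrom_natCast s g start hstart
      by_cases hr : PySem.Chars.find (s.drop start) g = -1
      · have hneg : PySem.Chars.findFrom s g (start : Int) none = -1 := by rw [hft, if_pos hr]
        simp only [pvFindLoopA, hneg]
        have hz : (List.range' start (s.length + 1 - start)).countP
            (fun i => g.isPrefixOf (s.drop i)) = 0 := by
          rw [List.countP_eq_zero]
          intro i hi
          rw [List.mem_range'] at hi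
          obtain ⟨k, hk, rfl⟩ := hi
          simp only [List.isPrefixOf_iff_prefix]
          intro hp
          exact (PySem.Chars.find_eq_neg_one_iff (s.drop start) g).mp hr
            (prefix_drop_infix (by omega) hp)
        rw [hz]; simp
      · -- a match was found at index start + rn
        have hrge : 0 ≤ PySem.Chars.find (s.drop start) g := by
          have := PySem.Chars.neg_one_le_find (s.drop start) g
          omega
        have hrlen : PySem.Chars.find (s.drop start) g ≤ (s.length - start : Int) := by
          have := PySem.Chars.find_le_length (s.drop start) g
          simp only [List.length_drop] at this
          omega
        obtain ⟨rn, hrn⟩ : ∃ rn : Nat, PySem.Chars.find (s.drop start) g = (rn : Int) :=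
          ⟨(PySem.Chars.find (s.drop start) g).toNat, (Int.toNat_of_nonneg hrge).symm⟩
        have hfeq : PySem.Chars.findFrom s g (start : Int) none = ((start + rn : Nat) : Int) := by
          rw [hft, if_neg hr, hrn]; push_cast; ring
        have hfne : PySem.Chars.findFrom s g (start : Int) none ≠ -1 := by
          rw [hfeq]; omega
        obtain ⟨hle, hpre, hmin⟩ := PySem.Chars.findFrom_natCast_spec s g start hstart hfne
        rw [hfeq] at hpre hmin
        simp only [Int.toNat_natCast] at hpre hmin
        have hjn : start + rn ≤ s.length := by omega
        simp only [pvFindLoopA]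
        rw [if_neg hfne, hfeq, Int.toNat_natCast]
        rw [ih (start + rn + 1) (count + 1) (by omega) (by omega)]
        have hsplit : List.range' start (s.length + 1 - start)
            = List.range' start rn
              ++ (start + rn) :: List.range' (start + rn + 1) (s.length - (start + rn)) := by
          rw [show s.length + 1 - start = rn + ((s.length - (start + rn)) + 1) from by omega,
            ← List.range'_append, List.range'_succ]
          simp
        rw [hsplit, List.countP_append, List.countP_cons]
        have hc0 : (List.range' start rn).countP (fun i => g.isPrefixOf (s.drop i)) = 0 := by
          rw [List.countP_eq_zero]
          intro i hi
          rw [List.mem_range'] at hi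
          obtain ⟨k, hk, rfl⟩ := hi
          simp only [List.isPrefixOf_iff_prefix]
          exact hmin (start + 1 * k) (by omega) (by omega)
        have hcj : (g.isPrefixOf (s.drop (start + rn))) = true := by
          rw [List.isPrefixOf_iff_prefix]; exact hpre
        rw [hc0, hcj]
        simp
        ring

-- Σ over a list of (if p x then w else 0) equals w * (number of x with p x)
lemma sum_ite_weight {α : Type} (l : List α) (p : α → Bool) (w : Int) :
    (l.map (fun x => if p x then w else 0)).sum = w * (l.countP p : Int) := by
  have h : (fun x => if p x then w else 0) = (fun x => w * (if p x = true then (1:Int) else 0)) := by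
    funext x; split_ifs <;> simp
  rw [h, List.sum_map_mul_left, PySem.List.sum_map_ite_one_zero]

-- exchange of the two summations (Int-valued)
lemma sum_sum_comm {α β : Type} (l1 : List α) (l2 : List β) (f : β → α → Int) :
    (l1.map (fun i => (l2.map (fun x => f x i)).sum)).sum
      = (l2.map (fun x => (l1.map (fun i => f x i)).sum)).sum := by
  induction l2 with
  | nil => simp
  | cons x xs ih =>
    simp only [List.map_cons, List.sum_cons, ← ih, PySem.List.sum_map_add_int]

-- the filtered weight sum is the Σ of if-then-else weights
lemma hitWeights_eq (genes : List (String × Int)) (s : List Char) :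
    pvHitWeights genes s
      = (genes.map (fun gw => if gw.1.toList.isPrefixOf s then gw.2 else 0)).sum := by
  unfold pvHitWeights
  induction genes with
  | nil => simp
  | cons gw t ih =>
    by_cases h : gw.1.toList <+: s <;>
      simp [List.isPrefixOf_iff_prefix, h, ih]

-- the suffix walk is the sum of the hit weights over all drop positions 0 .. length
lemma suffWalk_eq_sum (genes : List (String × Int)) (l : List Char) :
    pvSuffWalk genes l
      = ((List.range (l.length + 1)).map (fun i => pvHitWeights genes (l.drop i))).sum := by
  induction l with
  | nil => simp [pvSuffWalk]
  | cons c rest ih =>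
    rw [pvSuffWalk, ih]
    simp only [List.length_cons]
    conv_rhs => rw [List.range_succ_eq_map]
    simp only [List.map_cons, List.sum_cons, List.drop_zero]
    refine congrArg (pvHitWeights genes (c :: rest) + ·) ?_
    rw [List.map_map]
    exact congrArg List.sum (List.map_congr_left fun i _ => rfl)

-- B's per-strand score equals A's per-strand score
lemma score_eq (genes : List (String × Int)) (strand : String) :
    pvSuffWalk genes strand.toList
      = (genes.map (fun gw => gw.2 * num_occurrences gw.1 strand)).sum := by
  rw [suffWalk_eq_sum]
  simp only [hitWeights_eq]
  rw [sum_sum_comm]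
  refine congrArg List.sum (List.map_congr_left ?_)
  intro gw _
  rw [sum_ite_weight]
  congr 1
  rw [num_occurrences, pvFindLoopA_eq strand.toList gw.1.toList (strand.toList.length + 2) 0 0
    (by omega) (by omega)]
  simp [List.range_eq_range']

-- A's min/max accumulator step, as a function of the already-computed score
def pvStepA (acc : Option Int × Option Int) (score : Int) : Option Int × Option Int :=
  (match acc.1 with
    | none => some score
    | some m => if score < m then some score else some m,
   match acc.2 with
    | none => some score
    | some m => if m < score then some score else some m)

-- once both accumulators are set, the step fold is the running min / running max
lemma foldl_stepA_some (ss : List Int) :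
    ∀ (a b : Int), ss.foldl pvStepA (some a, some b)
      = (some (ss.foldl min a), some (ss.foldl max b)) := by
  induction ss with
  | nil => intro a b; simp
  | cons x t ih =>
    intro a b
    have hmn : (if x < a then some x else some a) = some (min a x) := by
      split_ifs with h <;> (congr 1; omega)
    have hmx : (if b < x then some x else some b) = some (max b x) := by
      split_ifs with h <;> (congr 1; omega)
    have h1 : pvStepA (some a, some b) x = (some (min a x), some (max b x)) := by
      simp only [pvStepA, hmn, hmx]
    simp only [List.foldl_cons, h1, ih]

-- the accumulator fold computes (min?, max?) of the score list
lemma foldl_stepA_minmax (ss : List Int) :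
    ss.foldl pvStepA (none, none)
      = match ss with
        | [] => (none, none)
        | _ => (PySem.List.min? ss (fun x => x), PySem.List.max? ss (fun x => x)) := by
  cases ss with
  | nil => simp
  | cons x t =>
    have h0 : pvStepA (none, none) x = (some x, some x) := rfl
    simp only [List.foldl_cons, h0, foldl_stepA_some]
    rw [PySem.List.min?_id_cons, PySem.List.max?_id_cons]

-- ===== VERDICT =====
theorem min_and_max_scores_spec : Claim_equal_min_and_max_scores := by
  intro scored_genes strands _
  unfold Spec_min_and_max_scores min_and_max_scores min_and_max_scores_alt
  have hbody : (fun (acc : Option Int × Option Int) (t : Int × Int × String) =>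
      match t, acc with
      | (first, last, strand), (min_score, max_score) =>
        let genes := PySem.List.slice scored_genes (some first) (some (last + 1))
        let score := (genes.map (fun gw => gw.2 * num_occurrences gw.1 strand)).sum
        let min_score := match min_score with
          | none => some score
          | some m => if score < m then some score else some m
        let max_score := match max_score with
          | none => some score
          | some m => if m < score then some score else some m
        (min_score, max_score))
      = (fun acc t => pvStepA acc
          (pvSuffWalk (PySem.List.slice scored_genes (some t.1) (some (t.2.1 + 1))) t.2.2.toList)) := by
    funext acc t
    obtain ⟨first, last, strand⟩ := t
    obtain ⟨mn, mx⟩ := acc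
    simp only [pvStepA, score_eq]
  rw [hbody, ← List.foldl_map, foldl_stepA_minmax]
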